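-- pv_equiv track=rewrite | github.com/seojungjoo/GunSaMojip | xmlmojip.py | MakeHtmlDoc
-- ===== SOURCE A (Python) =====
-- def MakeHtmlDoc(BookList):
--     from xml.dom.minidom import getDOMImplementation
--     #get Dom Implementation
--     impl = getDOMImplementation()
--
--     newdoc = impl.createDocument(None, "html", None)  #DOM 객체 생성
--     top_element = newdoc.documentElement
--     header = newdoc.createElement('header')
--     top_element.appendChild(header)
--
--     # Body 엘리먼트 생성.
--     body = newdoc.createElement('body')
--
--     for bookitem in BookList:
--         #create bold element
--         b = newdoc.createElement('b')
--         #create text node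
--         ibsnText = newdoc.createTextNode("gsteukiCd:" + bookitem[0])
--         b.appendChild(ibsnText)
--
--         body.appendChild(b)
--
--         # BR 태그 (엘리먼트) 생성.
--         br = newdoc.createElement('br')
--
--         body.appendChild(br)
--
--         #create title Element
--         p = newdoc.createElement('p')
--         #create text node
--         titleText= newdoc.createTextNode("gsgicimId:" + bookitem[1])
--         p.appendChild(titleText)
--
--         body.appendChild(p)
--         body.appendChild(br)  #line end
--
--     #append Body
--     top_element.appendChild(body)
--
--     return newdoc.toxml()
-- ===== SOURCE B (Python) =====
-- def _rep(c):
--     return {"&": "&amp;", "<": "&lt;", ">": "&gt;", '"': "&quot;"}.get(c, c)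
--
-- def _esc(s):
--     return "".join(_rep(c) for c in s)
--
-- def MakeHtmlDoc(BookList):
--     if BookList:
--         body = "<body>" + "".join(
--             "<b>gsteukiCd:" + _esc(a) + "</b><p>gsgicimId:" + _esc(b) + "</p><br/>"
--             for a, b in BookList) + "</body>"
--     else:
--         body = "<body/>"
--     return '<?xml version="1.0" ?><html><header/>' + body + "</html>"
-- ===== Notes on version B (the rewrite author's own statement) =====
-- stated objective: simpler
-- what changed: B drops the minidom DOM tree and appendChild node manipulation entirely and builds the serialized HTML string directly in one pass over BookList with a per-character escape, matching minidom's exact output (one <br/> per item, self-closing empty tags, the xml declaration).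
import Mathlib
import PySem

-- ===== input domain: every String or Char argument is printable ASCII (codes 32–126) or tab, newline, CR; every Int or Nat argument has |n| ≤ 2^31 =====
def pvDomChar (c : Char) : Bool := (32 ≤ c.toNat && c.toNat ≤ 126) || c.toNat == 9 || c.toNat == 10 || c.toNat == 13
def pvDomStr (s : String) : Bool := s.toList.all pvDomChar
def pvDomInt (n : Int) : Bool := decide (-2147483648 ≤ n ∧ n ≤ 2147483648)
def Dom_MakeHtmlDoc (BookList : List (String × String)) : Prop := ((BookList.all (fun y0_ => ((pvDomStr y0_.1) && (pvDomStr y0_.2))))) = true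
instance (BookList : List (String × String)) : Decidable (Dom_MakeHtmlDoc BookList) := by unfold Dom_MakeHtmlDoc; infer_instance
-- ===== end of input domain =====

-- B drops the minidom DOM tree entirely and concatenates the serialized HTML string
-- directly in one pass over BookList (objective: simpler/idiomatic; same asymptotic cost).

-- ===== PORT A =====
-- A builds a minidom document and serializes it with toxml().  The relevant minidom
-- behaviour is ported by hand, exactly for this construction: appendChild of a node that
-- already has a parent first removes it from its old position (A appends the same <br>
-- node twice per item, so it ends up once, after the <p>); toxml() writes
-- '<?xml version="1.0" ?>', self-closing tags for childless elements ('<header/>',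
-- '<body/>', '<br/>'), and escapes text data with the replace chain of minidom's
-- _write_data: &→&amp;, <→&lt;, "→&quot;, >→&gt; (in that order).

-- body child nodes; each created <br> node is a distinct object, modeled by its iteration index
inductive BNode
  | b : String → BNode
  | br : Nat → BNode
  | p : String → BNode
deriving DecidableEq, Repr

-- one iteration of A's loop: the four appendChild calls on body, in order
def MakeHtmlDoc_step (st : Nat × List BNode) (item : String × String) : Nat × List BNode :=
  let c1 := st.2 ++ [BNode.b item.1]                                -- body.appendChild(b)
  let c2 := c1 ++ [BNode.br st.1]                                   -- body.appendChild(br)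
  let c3 := c2 ++ [BNode.p item.2]                                  -- body.appendChild(p)
  let c4 := (c3.filter (fun n => !(n == BNode.br st.1))) ++ [BNode.br st.1]
      -- body.appendChild(br) again: br is removed from its old position, then appended
  (st.1 + 1, c4)

-- minidom _write_data: the four sequential str.replace calls (exact)
def minidomEsc (cs : List Char) : List Char :=
  PySem.Chars.replace
    (PySem.Chars.replace
      (PySem.Chars.replace
        (PySem.Chars.replace cs ['&'] "&amp;".toList)
        ['<'] "&lt;".toList)
      ['"'] "&quot;".toList)
    ['>'] "&gt;".toList

-- writexml of one body child
def renderNode : BNode → List Char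
  | .b t => "<b>".toList ++ minidomEsc ("gsteukiCd:".toList ++ t.toList) ++ "</b>".toList
  | .br _ => "<br/>".toList
  | .p t => "<p>".toList ++ minidomEsc ("gsgicimId:".toList ++ t.toList) ++ "</p>".toList

def MakeHtmlDoc (BookList : List (String × String)) : String :=
  let children := (BookList.foldl MakeHtmlDoc_step (0, [])).2
  String.mk ("<?xml version=\"1.0\" ?>".toList ++ "<html>".toList ++ "<header/>".toList ++
    (if children.isEmpty then "<body/>".toList
     else "<body>".toList ++ children.flatMap renderNode ++ "</body>".toList) ++
    "</html>".toList)

-- ===== PORT B =====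
-- Source B: _rep maps one character to its escaped form (dict lookup with the char itself as default)
def escChar (c : Char) : List Char :=
  if c == '&' then "&amp;".toList
  else if c == '<' then "&lt;".toList
  else if c == '>' then "&gt;".toList
  else if c == '"' then "&quot;".toList
  else [c]

-- Source B: _esc = "".join(_rep(c) for c in s)
def escB (s : String) : List Char := s.toList.flatMap escChar

-- one item's fragment of the body
def itemHtml (it : String × String) : List Char :=
  "<b>gsteukiCd:".toList ++ escB it.1 ++ "</b><p>gsgicimId:".toList ++ escB it.2 ++
    "</p><br/>".toList

def MakeHtmlDoc_alt (BookList : List (String × String)) : String :=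
  String.mk ("<?xml version=\"1.0\" ?><html><header/>".toList ++
    (if BookList.isEmpty then "<body/>".toList
     else "<body>".toList ++ BookList.flatMap itemHtml ++ "</body>".toList) ++
    "</html>".toList)

-- ===== PRECONDITION & SPEC =====
def Spec_MakeHtmlDoc (BookList : List (String × String)) (out : String) : Prop := out = MakeHtmlDoc_alt BookList
instance (BookList : List (String × String)) (out : String) : Decidable (Spec_MakeHtmlDoc BookList out) := by unfold Spec_MakeHtmlDoc; infer_instance

-- ===== CLAIM (what is proved, stated in full; the proofs are below) =====
def Claim_equal_MakeHtmlDoc : Prop := ∀ (BookList : List (String × String)), Dom_MakeHtmlDoc BookList → Spec_MakeHtmlDoc BookList (MakeHtmlDoc BookList)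

-- ===== LEMMAS AND PROOFS =====

-- str.replace with a single-character pattern is a per-character substitution
theorem go_single (a : Char) (new : List Char) :
    ∀ (l acc : List Char) (fuel : Nat), l.length ≤ fuel →
    PySem.Chars.replace.go [a] new fuel l acc
      = acc.reverse ++ l.flatMap (fun c => if c == a then new else [c]) := by
  intro l
  induction l with
  | nil =>
    intro acc fuel _
    cases fuel <;> simp [PySem.Chars.replace.go]
  | cons c t ih =>
    intro acc fuel hf
    cases fuel with
    | zero => simp at hf
    | succ f =>
      simp only [PySem.Chars.replace.go]
      by_cases h : a = c
      · subst h
        simp [List.isPrefixOf, ih _ f (by simpa using hf)]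
      · have hb : (a == c) = false := by simp [h]
        simp [List.isPrefixOf, hb, ih _ f (by simpa using hf), BEq.comm, h]

theorem replace_single (cs : List Char) (a : Char) (new : List Char) :
    PySem.Chars.replace cs [a] new
      = cs.flatMap (fun c => if c == a then new else [c]) := by
  rw [PySem.Chars.replace, if_neg (by simp), go_single a new cs [] cs.length (le_refl _)]
  simp

-- minidom's replace chain equals B's per-character escape
theorem minidomEsc_eq (cs : List Char) : minidomEsc cs = cs.flatMap escChar := by
  unfold minidomEsc
  rw [replace_single, replace_single, replace_single, replace_single]
  rw [List.flatMap_assoc, List.flatMap_assoc, List.flatMap_assoc]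
  apply List.flatMap_congr
  intro c _
  by_cases h1 : c = '&'
  · subst h1; decide
  · by_cases h2 : c = '<'
    · subst h2; decide
    · by_cases h3 : c = '"'
      · subst h3; decide
      · by_cases h4 : c = '>'
        · subst h4; decide
        · simp [h1, h2, h3, h4, escChar]

-- closed form of the children list A's loop builds
def chil : Nat → List (String × String) → List BNode
  | _, [] => []
  | i, it :: t => BNode.b it.1 :: BNode.p it.2 :: BNode.br i :: chil (i + 1) t

theorem fold_eq : ∀ (l : List (String × String)) (i : Nat) (acc : List BNode),
    (∀ j, BNode.br j ∈ acc → j < i) →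
    l.foldl MakeHtmlDoc_step (i, acc) = (i + l.length, acc ++ chil i l) := by
  intro l
  induction l with
  | nil => intro i acc _; simp [chil]
  | cons it t ih =>
    intro i acc hinv
    have hkeep : acc.filter (fun n => !(n == BNode.br i)) = acc := by
      apply List.filter_eq_self.mpr
      intro n hn
      cases n with
      | b _ => simp
      | p _ => simp
      | br j =>
        have := hinv j hn
        simp; omega
    have hstep : MakeHtmlDoc_step (i, acc) it
        = (i + 1, acc ++ [BNode.b it.1, BNode.p it.2, BNode.br i]) := by
      have hb : (BNode.b it.1 == BNode.br i) = false := rfl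
      have hp : (BNode.p it.2 == BNode.br i) = false := rfl
      simp only [MakeHtmlDoc_step, List.filter_append, hkeep]
      simp [hb, hp]
    rw [List.foldl_cons, hstep,
        ih (i + 1) _ (by
          intro j hj
          rcases List.mem_append.mp hj with hj | hj
          · have := hinv j hj; omega
          · simp at hj; omega)]
    simp [chil, List.append_assoc]
    omega

-- rendering the closed-form children equals B's per-item fragments
theorem render_chil : ∀ (l : List (String × String)) (i : Nat),
    (chil i l).flatMap renderNode = l.flatMap itemHtml := by
  intro l
  induction l with
  | nil => intro i; simp [chil]
  | cons it t ih =>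
    intro i
    simp only [chil, List.flatMap_cons, ih]
    rw [← List.append_assoc, ← List.append_assoc]
    congr 1
    simp only [renderNode, minidomEsc_eq, List.flatMap_append]
    have h1 : "gsteukiCd:".toList.flatMap escChar = "gsteukiCd:".toList := by decide
    have h2 : "gsgicimId:".toList.flatMap escChar = "gsgicimId:".toList := by decide
    rw [h1, h2]
    simp only [itemHtml, escB]
    have e1 : "<b>gsteukiCd:".toList = "<b>".toList ++ "gsteukiCd:".toList := by decide
    have e2 : "</b><p>gsgicimId:".toList
        = "</b>".toList ++ "<p>".toList ++ "gsgicimId:".toList := by decide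
    have e3 : "</p><br/>".toList = "</p>".toList ++ "<br/>".toList := by decide
    rw [e1, e2, e3]
    simp [List.append_assoc]

theorem main_eq (BookList : List (String × String)) :
    MakeHtmlDoc BookList = MakeHtmlDoc_alt BookList := by
  unfold MakeHtmlDoc MakeHtmlDoc_alt
  rw [fold_eq BookList 0 [] (by intro j h; simp at h)]
  simp only [List.nil_append]
  cases BookList with
  | nil => decide
  | cons it t =>
    have hne : (chil 0 (it :: t)).isEmpty = false := by simp [chil]
    have e : "<?xml version=\"1.0\" ?><html><header/>".toList
        = "<?xml version=\"1.0\" ?>".toList ++ "<html>".toList ++ "<header/>".toList := by decide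
    rw [hne, List.isEmpty_cons, e]
    simp [render_chil, List.append_assoc]

-- ===== VERDICT (by name: the statement is the Claim_ definition above) =====
theorem MakeHtmlDoc_spec : Claim_equal_MakeHtmlDoc := by
  intro BookList _
  exact main_eq BookList
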